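-- pv_equiv track=rewrite | github.com/Dormailler/Algorithm | 프로그래머스/3/12987. 숫자 게임/숫자 게임.py | solution
-- ===== SOURCE A (Python) =====
-- def solution(A, B):
--     answer = 0
--     A.sort()
--     B.sort()
--     p = 0
--     m = len(B)
--     for i in A:
--         for j in range(p,m):
--             if i < B[j]:
--                 answer += 1
--                 p = j+1
--                 break
--     return answer
-- ===== SOURCE B (Python) =====
-- def solution(A, B):
--     # Dual counting sweep (O(n log n)): instead of searching, for each A element,
--     # for its own partner in B, walk B in sorted order keeping a pool counter of
--     # not-yet-used strictly smaller A elements; each B element that finds the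
--     # pool non-empty scores one match.  Like A, this sorts both lists in place.
--     A.sort()
--     B.sort()
--     avail = 0
--     cnt = 0
--     i = 0
--     n = len(A)
--     for b in B:
--         while i < n and A[i] < b:
--             avail += 1
--             i += 1
--         if avail:
--             avail -= 1
--             cnt += 1
--     return cnt
-- ===== Notes on version B (the rewrite author's own statement) =====
-- stated objective: faster
-- what changed: Replaces A's A-driven search (each A element rescans B from p for its own partner, quadratic when matches fail) with the transposed B-driven sweep: one pass over sorted B with a pool counter of unused smaller A elements, so no per-element scan and no specific pairing is computed.
import Mathlib
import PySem

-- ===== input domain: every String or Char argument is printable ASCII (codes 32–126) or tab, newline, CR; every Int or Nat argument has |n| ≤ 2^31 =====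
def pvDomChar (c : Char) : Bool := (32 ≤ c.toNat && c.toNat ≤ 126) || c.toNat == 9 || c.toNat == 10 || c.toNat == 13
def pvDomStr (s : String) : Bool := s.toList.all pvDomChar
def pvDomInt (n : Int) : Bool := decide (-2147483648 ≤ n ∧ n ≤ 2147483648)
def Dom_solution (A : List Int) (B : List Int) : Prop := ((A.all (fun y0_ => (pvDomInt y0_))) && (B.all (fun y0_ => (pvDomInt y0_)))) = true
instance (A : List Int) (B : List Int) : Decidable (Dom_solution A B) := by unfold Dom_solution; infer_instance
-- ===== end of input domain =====

-- B replaces A's per-element search in B by the transposed single sweep over B with a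
-- pool counter of unused smaller A elements (measured faster; see claim).
-- Both Pythons sort their argument lists in place; the equivalence proved is about the return value.

-- ===== PORT A =====
-- inner loop "for j in range(p,m): if i < B[j]: answer += 1; p = j+1; break"
-- (Bs.getD j 0 is exact for Python's B[j] here: the index is only read when j < m = len(B))
def solutionInner (a : Int) (Bs : List Int) (m : Nat) (st : Int × Nat) (j : Nat) : Int × Nat :=
  if j < m then
    if a < Bs.getD j 0 then (st.1 + 1, j + 1)
    else solutionInner a Bs m st (j + 1)
  else st
termination_by m - j

def solution (A : List Int) (B : List Int) : Int :=
  let As := PySem.List.sorted A (fun x => x) false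
  let Bs := PySem.List.sorted B (fun x => x) false
  let m := Bs.length
  (As.foldl (fun (st : Int × Nat) i => solutionInner i Bs m st st.2) ((0 : Int), (0 : Nat))).1

-- ===== PORT B =====
-- "while i < n and A[i] < b: avail += 1; i += 1"
-- (As.getD i 0 is exact for Python's A[i] here: the index is only read when i < n = len(A))
def altAdvance (b : Int) (As : List Int) (n : Nat) (i : Nat) (avail : Int) : Nat × Int :=
  if i < n then
    if As.getD i 0 < b then altAdvance b As n (i + 1) (avail + 1)
    else (i, avail)
  else (i, avail)
termination_by n - i

def solution_alt (A : List Int) (B : List Int) : Int :=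
  let As := PySem.List.sorted A (fun x => x) false
  let Bs := PySem.List.sorted B (fun x => x) false
  let n := As.length
  (Bs.foldl (fun (st : Nat × Int × Int) b =>
      let ia := altAdvance b As n st.1 st.2.1
      if ia.2 ≠ 0 then (ia.1, ia.2 - 1, st.2.2 + 1) else (ia.1, ia.2, st.2.2))
    ((0 : Nat), (0 : Int), (0 : Int))).2.2

-- ===== PRECONDITION & SPEC =====
def Spec_solution (A : List Int) (B : List Int) (out : Int) : Prop := out = solution_alt A B
instance (A : List Int) (B : List Int) (out : Int) : Decidable (Spec_solution A B out) := by unfold Spec_solution; infer_instance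

-- ===== CLAIM (what is proved, stated in full; the proofs are below) =====
def Claim_equal_solution : Prop := ∀ (A : List Int) (B : List Int), Dom_solution A B → Spec_solution A B (solution A B)

-- ===== LEMMAS AND PROOFS =====

-- The common clean recursion both ports are reduced to: greedy match count on two sorted lists.
def fmatch : List Int → List Int → Int
  | _, [] => 0
  | [], _ :: _ => 0
  | a :: A, b :: B => if a < b then 1 + fmatch A B else fmatch (a :: A) B
termination_by _ B => B.length

theorem fmatch_nil_right (A : List Int) : fmatch A [] = 0 := by cases A <;> simp [fmatch]

theorem fmatch_nil_left (B : List Int) : fmatch [] B = 0 := by cases B <;> simp [fmatch]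

theorem fmatch_cons_cons (a : Int) (A : List Int) (b : Int) (B : List Int) :
    fmatch (a :: A) (b :: B) = if a < b then 1 + fmatch A B else fmatch (a :: A) B := by
  rw [fmatch]

theorem dropWhile_eq_drop_takeWhile (p : Int → Bool) (l : List Int) :
    l.dropWhile p = l.drop ((l.takeWhile p).length) := by
  induction l with
  | nil => rfl
  | cons x l ih =>
      by_cases h : p x
      · rw [List.dropWhile_cons, List.takeWhile_cons]
        simp [h, ih]
      · simp [h]

-- if no element of L beats any element of D, the greedy count is 0
theorem fmatch_zero (L D : List Int) (h : ∀ x ∈ L, ∀ d ∈ D, ¬ x < d) : fmatch L D = 0 := by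
  induction D generalizing L with
  | nil => exact fmatch_nil_right L
  | cons d D ih =>
      cases L with
      | nil => exact fmatch_nil_left _
      | cons x L =>
          rw [fmatch_cons_cons, if_neg (h x (List.mem_cons_self) d (List.mem_cons_self))]
          exact ih (x :: L) (fun y hy e he => h y hy e (List.mem_cons_of_mem d he))

-- ---- A side ----

-- A's inner scan from j, characterised by takeWhile on Bs.drop j
theorem solutionInner_eq (a : Int) (Bs : List Int) (st : Int × Nat) (j : Nat)
    (hj : j ≤ Bs.length) :
    solutionInner a Bs Bs.length st j =
      (if ((Bs.drop j).takeWhile (fun x => decide (x ≤ a))).length < (Bs.drop j).length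
       then (st.1 + 1, j + ((Bs.drop j).takeWhile (fun x => decide (x ≤ a))).length + 1)
       else st) := by
  unfold solutionInner
  by_cases hjm : j < Bs.length
  · have hdrop : Bs.drop j = Bs[j] :: Bs.drop (j + 1) := List.drop_eq_getElem_cons hjm
    have hgetD : Bs.getD j 0 = Bs[j] := List.getD_eq_getElem Bs 0 hjm
    by_cases hab : a < Bs.getD j 0
    · have hnle : ¬ (Bs[j] ≤ a) := by rw [hgetD] at hab; omega
      have htw : (Bs.drop j).takeWhile (fun x => decide (x ≤ a)) = [] := by
        rw [hdrop, List.takeWhile_cons, if_neg (by simp [hnle])]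
      have hcond : ((Bs.drop j).takeWhile (fun x => decide (x ≤ a))).length <
          (Bs.drop j).length := by
        rw [htw, List.length_nil, List.length_drop]; omega
      rw [if_pos hjm, if_pos hab, if_pos hcond, htw]
      simp
    · have hle : Bs[j] ≤ a := by rw [hgetD] at hab; omega
      have htw : (Bs.drop j).takeWhile (fun x => decide (x ≤ a)) =
          Bs[j]'hjm :: (Bs.drop (j + 1)).takeWhile (fun x => decide (x ≤ a)) := by
        rw [hdrop, List.takeWhile_cons, if_pos (by simp [hle])]
      rw [if_pos hjm, if_neg hab, solutionInner_eq a Bs st (j + 1) (by omega), htw,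
          List.length_cons, hdrop, List.length_cons]
      rcases lt_or_ge ((Bs.drop (j + 1)).takeWhile (fun x => decide (x ≤ a))).length
        (Bs.drop (j + 1)).length with h | h
      · rw [if_pos h, if_pos (by omega)]
        simp only [Prod.mk.injEq]
        refine ⟨by trivial, by omega⟩
      · rw [if_neg (by omega), if_neg (by omega)]
  · rw [if_neg hjm]
    have : Bs.drop j = [] := List.drop_eq_nil_of_le (by omega)
    simp [this]
termination_by Bs.length - j

-- one fmatch step, characterised by the same takeWhile
theorem fmatch_step (a : Int) (rest D : List Int) :
    fmatch (a :: rest) D =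
      (if (D.takeWhile (fun x => decide (x ≤ a))).length < D.length
       then 1 + fmatch rest (D.drop ((D.takeWhile (fun x => decide (x ≤ a))).length + 1))
       else 0) := by
  induction D with
  | nil => simp [fmatch_nil_right]
  | cons d D ih =>
      by_cases hd : d ≤ a
      · have htw : (d :: D).takeWhile (fun x => decide (x ≤ a)) =
            d :: D.takeWhile (fun x => decide (x ≤ a)) := by
          rw [List.takeWhile_cons, if_pos (by simp [hd])]
        rw [fmatch_cons_cons, if_neg (by omega), ih, htw, List.length_cons, List.length_cons]
        rcases lt_or_ge (D.takeWhile (fun x => decide (x ≤ a))).length D.length with h | h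
        · rw [if_pos h, if_pos (by omega), List.drop_succ_cons]
        · rw [if_neg (by omega), if_neg (by omega)]
      · have htw : (d :: D).takeWhile (fun x => decide (x ≤ a)) = [] := by
          rw [List.takeWhile_cons, if_neg (by simp [hd])]
        have hcond : ((d :: D).takeWhile (fun x => decide (x ≤ a))).length <
            (d :: D).length := by rw [htw]; simp
        rw [fmatch_cons_cons, if_pos (by omega), if_pos hcond, htw]
        simp

-- A's fold equals fmatch on the not-yet-consumed suffix of Bs (As sorted)
theorem solution_fold_eq_fmatch (Bs : List Int) (As : List Int)
    (hA : As.Pairwise (· ≤ ·)) :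
    ∀ (p : Nat) (cnt : Int), p ≤ Bs.length →
      (As.foldl (fun (st : Int × Nat) i => solutionInner i Bs Bs.length st st.2) (cnt, p)).1 =
        cnt + fmatch As (Bs.drop p) := by
  induction As with
  | nil => intro p cnt _; simp [fmatch_nil_left]
  | cons a rest ih =>
      intro p cnt hp
      have hrest : rest.Pairwise (· ≤ ·) := hA.of_cons
      have hax : ∀ x ∈ rest, a ≤ x := fun x hx => (List.pairwise_cons.mp hA).1 x hx
      have hlen : (Bs.drop p).length = Bs.length - p := List.length_drop
      simp only [List.foldl_cons]
      rw [solutionInner_eq a Bs (cnt, p) p hp, fmatch_step a rest (Bs.drop p)]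
      by_cases hm : ((Bs.drop p).takeWhile (fun x => decide (x ≤ a))).length <
          (Bs.drop p).length
      · rw [if_pos hm, if_pos hm]
        rw [ih hrest (p + ((Bs.drop p).takeWhile (fun x => decide (x ≤ a))).length + 1)
              (cnt + 1) (by omega)]
        have hdd : Bs.drop (p + ((Bs.drop p).takeWhile (fun x => decide (x ≤ a))).length + 1) =
            (Bs.drop p).drop (((Bs.drop p).takeWhile (fun x => decide (x ≤ a))).length + 1) := by
          rw [List.drop_drop]
          congr 1
        rw [hdd]
        ring
      · rw [if_neg hm, if_neg hm]
        rw [ih hrest p cnt hp]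
        have htwle : ((Bs.drop p).takeWhile (fun x => decide (x ≤ a))).length ≤
            (Bs.drop p).length :=
          (List.takeWhile_prefix (l := Bs.drop p) (p := fun x => decide (x ≤ a))).length_le
        have htw : (Bs.drop p).takeWhile (fun x => decide (x ≤ a)) = Bs.drop p := by
          have hpre := List.takeWhile_prefix (l := Bs.drop p) (p := fun x => decide (x ≤ a))
          exact hpre.eq_of_length (by omega)
        have hall : ∀ d ∈ Bs.drop p, d ≤ a := by
          intro d hd
          have hmem : d ∈ (Bs.drop p).takeWhile (fun x => decide (x ≤ a)) := by
            rw [htw]; exact hd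
          have hdec := List.mem_takeWhile_imp hmem
          exact of_decide_eq_true hdec
        have hz : fmatch rest (Bs.drop p) = 0 :=
          fmatch_zero rest (Bs.drop p)
            (fun x hx d hd => by have := hall d hd; have := hax x hx; omega)
        rw [hz]

-- ---- B side ----

-- fmatch with v phantom A-elements smaller than everything in B
def fphantom (A B : List Int) : Nat → Int
  | 0 => fmatch A B
  | v + 1 => match B with
      | [] => 0
      | _ :: B' => 1 + fphantom A B' v

theorem fphantom_nil (A : List Int) (v : Nat) : fphantom A [] v = 0 := by
  cases v <;> simp [fphantom, fmatch_nil_right]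

-- an A-head smaller than all of B behaves like a phantom
theorem fphantom_cons (a : Int) (A B : List Int) (v : Nat) (h : ∀ y ∈ B, a < y) :
    fphantom (a :: A) B v = fphantom A B (v + 1) := by
  induction B generalizing v with
  | nil => simp [fphantom_nil]
  | cons b B ih =>
      cases v with
      | zero =>
          simp only [fphantom, fmatch_cons_cons, if_pos (h b List.mem_cons_self)]
      | succ v =>
          simp only [fphantom]
          rw [ih v (fun y hy => h y (List.mem_cons_of_mem b hy))]

theorem fphantom_append (pre suf B : List Int) (v : Nat)
    (h : ∀ x ∈ pre, ∀ y ∈ B, x < y) :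
    fphantom (pre ++ suf) B v = fphantom suf B (v + pre.length) := by
  induction pre generalizing v with
  | nil => simp
  | cons x pre ih =>
      rw [List.cons_append, fphantom_cons x (pre ++ suf) B v (h x List.mem_cons_self),
          ih (v + 1) (fun y hy z hz => h y (List.mem_cons_of_mem x hy) z hz)]
      congr 1
      simp; omega

-- the list-level shape of B's sweep
def gsweep : List Int → List Int → Nat → Int → Int
  | _, [], _, c => c
  | A, b :: B, v, c =>
      let r := (A.takeWhile (fun x => decide (x < b))).length
      if v + r ≠ 0 then gsweep (A.drop r) B (v + r - 1) (c + 1)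
      else gsweep (A.drop r) B 0 c
termination_by _ B => B.length

theorem gsweep_eq_fphantom (B : List Int) (hB : B.Pairwise (· ≤ ·)) :
    ∀ (A : List Int) (v : Nat) (c : Int), gsweep A B v c = c + fphantom A B v := by
  induction B with
  | nil => intro A v c; simp [gsweep, fphantom_nil]
  | cons b B ih =>
      intro A v c
      have hB' : B.Pairwise (· ≤ ·) := hB.of_cons
      have hbB : ∀ y ∈ B, b ≤ y := fun y hy => (List.pairwise_cons.mp hB).1 y hy
      set pre := A.takeWhile (fun x => decide (x < b)) with hpre
      set r := pre.length with hr
      have hsplit : A = pre ++ A.drop r := by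
        conv_lhs => rw [← List.takeWhile_append_dropWhile (p := fun x => decide (x < b)) (l := A)]
        rw [dropWhile_eq_drop_takeWhile, ← hpre, ← hr]
      have hprelt : ∀ x ∈ pre, ∀ y ∈ b :: B, x < y := by
        intro x hx y hy
        have hxb : x < b := by
          have hmem : x ∈ A.takeWhile (fun x => decide (x < b)) := by rw [← hpre]; exact hx
          have hdec := List.mem_takeWhile_imp hmem
          exact of_decide_eq_true hdec
        rcases List.mem_cons.mp hy with rfl | hy
        · exact hxb
        · have := hbB y hy; omega
      have hph : fphantom A (b :: B) v = fphantom (A.drop r) (b :: B) (v + r) := by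
        conv_lhs => rw [hsplit]
        exact fphantom_append pre (A.drop r) (b :: B) v hprelt
      rw [gsweep]
      by_cases hv : v + r ≠ 0
      · rw [if_pos hv, ih hB' (A.drop r) (v + r - 1) (c + 1), hph]
        obtain ⟨w, hw⟩ : ∃ w, v + r = w + 1 := ⟨v + r - 1, by omega⟩
        rw [hw]
        simp only [fphantom, Nat.add_sub_cancel]
        ring
      · rw [if_neg hv, ih hB' (A.drop r) 0 c, hph]
        have hv0 : v + r = 0 := by omega
        rw [hv0]
        -- fphantom (A.drop r) (b :: B) 0 = fphantom (A.drop r) B 0: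
        -- the head of A.drop r (if any) fails (· < b)
        congr 1
        simp only [fphantom]
        cases hAd : A.drop r with
        | nil => rw [fmatch_nil_left, fmatch_nil_left]
        | cons x L =>
            have hxb : ¬ x < b := by
              have : A.drop r = A.dropWhile (fun x => decide (x < b)) := by
                rw [dropWhile_eq_drop_takeWhile, ← hpre, ← hr]
              rw [this] at hAd
              have := List.head_dropWhile_not (p := fun x => decide (x < b)) (l := A)
                (by simp [hAd])
              simpa [hAd] using this
            rw [fmatch_cons_cons, if_neg hxb]

-- B's while-loop advance, characterised by takeWhile on As.drop i
theorem altAdvance_eq (b : Int) (As : List Int) (i : Nat) (avail : Int)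
    (hi : i ≤ As.length) :
    altAdvance b As As.length i avail =
      (i + ((As.drop i).takeWhile (fun x => decide (x < b))).length,
       avail + ((As.drop i).takeWhile (fun x => decide (x < b))).length) := by
  unfold altAdvance
  by_cases him : i < As.length
  · have hdrop : As.drop i = As[i] :: As.drop (i + 1) := List.drop_eq_getElem_cons him
    have hgetD : As.getD i 0 = As[i] := List.getD_eq_getElem As 0 him
    by_cases hab : As.getD i 0 < b
    · have hxb : As[i] < b := by rw [hgetD] at hab; exact hab
      have htw : (As.drop i).takeWhile (fun x => decide (x < b)) =
          As[i]'him :: (As.drop (i + 1)).takeWhile (fun x => decide (x < b)) := by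
        rw [hdrop, List.takeWhile_cons, if_pos (by simp [hxb])]
      rw [if_pos him, if_pos hab, altAdvance_eq b As (i + 1) (avail + 1) (by omega), htw,
          List.length_cons]
      simp only [Prod.mk.injEq]
      refine ⟨by omega, by push_cast; ring⟩
    · have hxb : ¬ As[i] < b := by rw [hgetD] at hab; exact hab
      have htw : (As.drop i).takeWhile (fun x => decide (x < b)) = [] := by
        rw [hdrop, List.takeWhile_cons, if_neg (by simp [hxb])]
      rw [if_pos him, if_neg hab, htw]
      simp
  · rw [if_neg him]
    have : As.drop i = [] := List.drop_eq_nil_of_le (by omega)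
    simp [this]
termination_by As.length - i

-- B's fold equals gsweep on the not-yet-consumed suffix of As
theorem alt_fold_eq_gsweep (As : List Int) :
    ∀ (Bs : List Int) (i : Nat) (v : Nat) (cnt : Int), i ≤ As.length →
      ((Bs.foldl (fun (st : Nat × Int × Int) b =>
          let ia := altAdvance b As As.length st.1 st.2.1
          if ia.2 ≠ 0 then (ia.1, ia.2 - 1, st.2.2 + 1) else (ia.1, ia.2, st.2.2))
        (i, (v : Int), cnt)).2.2) = gsweep (As.drop i) Bs v cnt := by
  intro Bs
  induction Bs with
  | nil => intro i v cnt _; simp [gsweep]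
  | cons b Bs ih =>
      intro i v cnt hi
      have hrle : ((As.drop i).takeWhile (fun x => decide (x < b))).length ≤
          (As.drop i).length :=
        (List.takeWhile_prefix (l := As.drop i) (p := fun x => decide (x < b))).length_le
      have hlen : (As.drop i).length = As.length - i := List.length_drop
      simp only [List.foldl_cons]
      rw [altAdvance_eq b As i (v : Int) hi]
      set r := ((As.drop i).takeWhile (fun x => decide (x < b))).length with hr
      have hdd : (As.drop i).drop r = As.drop (i + r) := List.drop_drop
      simp only [gsweep]
      by_cases hv : v + r ≠ 0
      · have hv' : ((v : Int) + (r : Int)) ≠ 0 := by omega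
        rw [if_pos hv', if_pos hv]
        have hcast : (v : Int) + (r : Int) - 1 = ((v + r - 1 : Nat) : Int) := by omega
        rw [hcast, ih (i + r) (v + r - 1) (cnt + 1) (by omega), hdd]
      · have hv0 : v + r = 0 := by omega
        have hveq : (v : Int) + (r : Int) = 0 := by omega
        rw [if_neg (by simp [hveq]), if_neg hv]
        have h0 : (v : Int) + (r : Int) = ((0 : Nat) : Int) := by rw [hveq]; simp
        rw [h0, ih (i + r) 0 cnt (by omega), hdd]

-- ===== VERDICT (by name: the statement is the Claim_ definition above) =====
theorem solution_spec : Claim_equal_solution := by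
  intro A B _
  unfold Spec_solution solution solution_alt
  have hA : (PySem.List.sorted A (fun x => x) false).Pairwise (· ≤ ·) := by
    simpa using PySem.List.sorted_pairwise (xs := A) (key := fun x => x)
  have hB : (PySem.List.sorted B (fun x => x) false).Pairwise (· ≤ ·) := by
    simpa using PySem.List.sorted_pairwise (xs := B) (key := fun x => x)
  set As := PySem.List.sorted A (fun x => x) false
  set Bs := PySem.List.sorted B (fun x => x) false
  rw [solution_fold_eq_fmatch Bs As hA 0 0 (Nat.zero_le _)]
  have h2 := alt_fold_eq_gsweep As Bs 0 0 0 (Nat.zero_le _)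
  simp only [Nat.cast_zero, List.drop_zero] at h2
  rw [h2, gsweep_eq_fphantom Bs hB As 0 0]
  simp [fphantom]
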